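-- pv_equiv track=rewrite | github.com/keshon/nixos-config | nixctl/modules/pkg.py | _find_with_pkgs_list_insert_line
-- ===== SOURCE A (Python) =====
-- def _nix_line_is_comment(stripped: str) -> bool:
--     """Whole-line Nix # comment (user-packages.nix style)."""
--     return bool(stripped) and stripped.startswith("#")
--
-- def _find_with_pkgs_header_line(lines: list[str]) -> int | None:
--     """
--     Index of the real `with pkgs; [` line — not a # comment (comments may mention
--     `with pkgs; [` and would break naive matching).
--     """
--     for i, line in enumerate(lines):
--         stripped = line.strip()
--         if _nix_line_is_comment(stripped):
--             continue
--         if "with pkgs" in line and "[" in line: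
--             return i
--     return None
--
-- def _find_with_pkgs_list_insert_line(lines: list[str]) -> int | None:
--     """
--     Line index to insert a new attribute name: immediately before the `]` that closes
--     the first `with pkgs; [` list in the file.
--     """
--     start = _find_with_pkgs_header_line(lines)
--     if start is None:
--         return None
--     depth = lines[start].count("[") - lines[start].count("]")
--     for i in range(start + 1, len(lines)):
--         depth += lines[i].count("[") - lines[i].count("]")
--         if depth <= 0:
--             return i
--     return None
-- ===== SOURCE B (Python) =====
-- def _find_with_pkgs_list_insert_line(lines):
--     """Prefix-sum table of bracket deltas + declarative selection with next().
--
--     pre[k] is the bracket balance after the first k lines, so the list closes at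
--     line i exactly when pre[i + 1] <= pre[h] (h = header line index).
--     """
--     pre = [0]
--     for ln in lines:
--         pre.append(pre[-1] + ln.count("[") - ln.count("]"))
--     h = next((i for i, ln in enumerate(lines)
--               if not ln.strip().startswith("#")
--               and "with pkgs" in ln and "[" in ln), None)
--     if h is None:
--         return None
--     base = pre[h]
--     return next((j - 1 for j, p in enumerate(pre) if j > h + 1 and p <= base), None)
-- ===== Notes on version B (the rewrite author's own statement) =====
-- stated objective: alternative
-- what changed: B precomputes a prefix-sum table of per-line bracket deltas and then picks both the header and the answer declaratively with next() over generators (the answer is the first table entry past the header that drops back to the header's balance), instead of A's helper search plus an index loop carrying a running depth.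
import Mathlib
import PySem

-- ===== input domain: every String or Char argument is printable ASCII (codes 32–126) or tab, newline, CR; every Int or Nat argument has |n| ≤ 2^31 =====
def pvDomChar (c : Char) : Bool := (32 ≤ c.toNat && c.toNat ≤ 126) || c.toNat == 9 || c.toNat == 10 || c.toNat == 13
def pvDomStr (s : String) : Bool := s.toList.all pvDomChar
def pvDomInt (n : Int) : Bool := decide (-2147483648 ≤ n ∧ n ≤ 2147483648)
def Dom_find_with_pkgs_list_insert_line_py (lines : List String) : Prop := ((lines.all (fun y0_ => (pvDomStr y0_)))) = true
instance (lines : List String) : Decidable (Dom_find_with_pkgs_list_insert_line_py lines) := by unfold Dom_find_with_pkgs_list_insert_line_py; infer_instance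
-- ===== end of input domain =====

-- B builds a prefix-sum table of bracket deltas and selects header and answer by
-- threshold comparisons over that table, instead of A's staged search + running depth
-- (objective: alternative, same cost).

-- ===== PORT A =====
-- count("[") - count("]") of one line (this expression appears verbatim in both Pythons)
def pvBr (l : String) : Int := (PySem.Str.count l "[" : Int) - (PySem.Str.count l "]" : Int)

-- _nix_line_is_comment
def pvNixLineIsComment (stripped : String) : Bool :=
  (PySem.Str.len stripped != 0) && PySem.Str.startswith stripped "#"

-- _find_with_pkgs_header_line's enumerate loop; besides the index it hands back
-- lines[start] (for A's depth initialisation) and the remaining suffix (A's range loop)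
def pvHeaderA (ls : List String) (i : Int) : Option (Int × String × List String) :=
  match ls with
  | [] => none
  | l :: rest =>
    if pvNixLineIsComment (PySem.Str.strip l) then pvHeaderA rest (i + 1)
    else if PySem.Str.isIn "with pkgs" l && PySem.Str.isIn "[" l then some (i, l, rest)
    else pvHeaderA rest (i + 1)
termination_by structural ls

-- the range(start+1, len(lines)) depth loop
def pvDepthA (ls : List String) (i depth : Int) : Option Int :=
  match ls with
  | [] => none
  | l :: rest =>
    let d := depth + pvBr l
    if d ≤ 0 then some i else pvDepthA rest (i + 1) d
termination_by structural ls

def find_with_pkgs_list_insert_line_py (lines : List String) : Option Int :=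
  match pvHeaderA lines 0 with
  | none => none
  | some (start, l, rest) => pvDepthA rest (start + 1) (pvBr l)

-- ===== PORT B =====
-- pre = [0]; for ln in lines: pre.append(pre[-1] + ln.count("[") - ln.count("]"))
def pvPreB (lines : List String) : List Int :=
  lines.foldl (fun acc ln => acc ++ [(PySem.List.pyGet? acc (-1)).getD 0 + pvBr ln]) [0]

-- next((i for i, ln in enumerate(lines) if not ln.strip().startswith("#")
--       and "with pkgs" in ln and "[" in ln), None)
def pvHeaderB (ls : List String) (i : Int) : Option Int :=
  match ls with
  | [] => none
  | l :: rest =>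
    if !(PySem.Str.startswith (PySem.Str.strip l) "#") &&
       (PySem.Str.isIn "with pkgs" l && PySem.Str.isIn "[" l)
    then some i else pvHeaderB rest (i + 1)
termination_by structural ls

-- next((j - 1 for j, p in enumerate(pre) if j > h + 1 and p <= base), None)
def pvScanB (pre : List Int) (j h base : Int) : Option Int :=
  match pre with
  | [] => none
  | p :: rest =>
    if h + 1 < j ∧ p ≤ base then some (j - 1) else pvScanB rest (j + 1) h base
termination_by structural pre

def find_with_pkgs_list_insert_line_py_alt (lines : List String) : Option Int :=
  let pre := pvPreB lines
  match pvHeaderB lines 0 with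
  | none => none
  | some h => pvScanB pre 0 h ((PySem.List.pyGet? pre h).getD 0)

-- ===== PRECONDITION & SPEC =====
def Spec_find_with_pkgs_list_insert_line_py (lines : List String) (out : Option Int) : Prop := out = find_with_pkgs_list_insert_line_py_alt lines
instance (lines : List String) (out : Option Int) : Decidable (Spec_find_with_pkgs_list_insert_line_py lines out) := by unfold Spec_find_with_pkgs_list_insert_line_py; infer_instance

-- ===== CLAIM (what is proved, stated in full; the proofs are below) =====
def Claim_equal_find_with_pkgs_list_insert_line_py : Prop := ∀ (lines : List String), Dom_find_with_pkgs_list_insert_line_py lines → Spec_find_with_pkgs_list_insert_line_py lines (find_with_pkgs_list_insert_line_py lines)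

-- ===== LEMMAS AND PROOFS =====

-- running bracket balances after each line, starting from balance s
def pvPartials (s : Int) (ls : List String) : List Int :=
  match ls with
  | [] => []
  | l :: t => (s + pvBr l) :: pvPartials (s + pvBr l) t

def pvSumBr (ls : List String) : Int := (ls.map pvBr).sum

theorem pvPreB_aux (ls : List String) : ∀ (a : List Int) (s : Int),
    List.foldl (fun acc ln => acc ++ [(PySem.List.pyGet? acc (-1)).getD 0 + pvBr ln]) (a ++ [s]) ls
      = a ++ [s] ++ pvPartials s ls := by
  induction ls with
  | nil => intro a s; simp [pvPartials]
  | cons l t ih =>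
    intro a s
    simp only [List.foldl, PySem.List.pyGet?_neg_one_append_singleton, Option.getD_some,
      pvPartials]
    have := ih (a ++ [s]) (s + pvBr l)
    simpa [List.append_assoc] using this

theorem pvPreB_eq (ls : List String) : pvPreB ls = 0 :: pvPartials 0 ls := by
  have := pvPreB_aux ls [] 0
  simpa [pvPreB] using this

theorem pvPartials_append (t1 t2 : List String) : ∀ s : Int,
    pvPartials s (t1 ++ t2) = pvPartials s t1 ++ pvPartials (s + pvSumBr t1) t2 := by
  induction t1 with
  | nil =>
    intro s
    show pvPartials s t2 = [] ++ pvPartials (s + pvSumBr []) t2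
    simp [pvSumBr]
  | cons l t ih =>
    intro s
    simp only [List.cons_append, pvPartials, ih (s + pvBr l), pvSumBr, List.map_cons,
      List.sum_cons]
    rw [add_assoc]

theorem pvPartials_length (t : List String) : ∀ s, (pvPartials s t).length = t.length := by
  induction t with
  | nil => intro s; rfl
  | cons l t ih => intro s; simp [pvPartials, ih]

theorem pvPartials_getElem? (t : List String) : ∀ (s : Int) (m : Nat), m < t.length →
    (pvPartials s t)[m]? = some (s + pvSumBr (t.take (m + 1))) := by
  induction t with
  | nil => intro s m h; simp at h
  | cons l t ih =>
    intro s m h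
    cases m with
    | zero => simp [pvPartials, pvSumBr]
    | succ m =>
      have := ih (s + pvBr l) m (by simpa using h)
      simp only [pvPartials, List.getElem?_cons_succ, this, List.take_succ_cons, pvSumBr,
        List.map_cons, List.sum_cons]
      congr 1
      omega

-- skipping the table entries at or before the header: the j > h + 1 guard is false there
theorem pvScanB_skip (pre1 : List Int) : ∀ (rest : List Int) (j h base : Int),
    j + pre1.length ≤ h + 2 →
    pvScanB (pre1 ++ rest) j h base = pvScanB rest (j + pre1.length) h base := by
  induction pre1 with
  | nil => intro rest j h base _; simp
  | cons p t ih =>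
    intro rest j h base hle
    have hle' : j + ((t.length : Int) + 1) ≤ h + 2 := by
      push_cast [List.length_cons] at hle
      omega
    have hj : ¬ (h + 1 < j ∧ p ≤ base) := by
      rintro ⟨hjj, -⟩; omega
    simp only [List.cons_append, pvScanB, if_neg hj]
    have := ih rest (j + 1) h base (by omega)
    rw [this]
    congr 1
    push_cast [List.length_cons]
    omega

-- past the header, B's table scan is exactly A's running-depth loop
theorem pvScanB_main (t : List String) : ∀ (i s base h : Int), h + 1 ≤ i →
    pvScanB (pvPartials s t) (i + 1) h base = pvDepthA t i (s - base) := by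
  induction t with
  | nil => intro i s base h _; rfl
  | cons l t ih =>
    intro i s base h hi
    simp only [pvPartials, pvScanB, pvDepthA]
    by_cases hd : s - base + pvBr l ≤ 0
    · rw [if_pos (by constructor <;> omega), if_pos hd]
      congr 1
      omega
    · rw [if_neg (by rintro ⟨-, hb⟩; omega), if_neg hd]
      have := ih (i + 1) (s + pvBr l) base h (by omega)
      rw [show i + 1 + 1 = (i + 1) + 1 from rfl] at this
      rw [this]
      congr 1
      omega

-- the two header searches agree, and A's extra components are lines[k] and drop (k+1)
theorem pvHeader_rel (ls : List String) : ∀ (i : Int),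
    (pvHeaderA ls i = none ∧ pvHeaderB ls i = none) ∨
    ∃ (k : Nat) (l : String), k < ls.length ∧ ls[k]? = some l ∧
      pvHeaderA ls i = some (i + (k : Int), l, ls.drop (k + 1)) ∧
      pvHeaderB ls i = some (i + (k : Int)) := by
  induction ls with
  | nil => intro i; left; exact ⟨rfl, rfl⟩
  | cons l t ih =>
    intro i
    by_cases hc : PySem.Str.startswith (PySem.Str.strip l) "#" = true
    · -- comment line: both skip
      have hcA : pvNixLineIsComment (PySem.Str.strip l) = true := by
        have hpre := (PySem.Chars.startswith_iff (PySem.Str.strip l).toList "#".toList).mp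
          (by simpa using hc)
        have hne : (PySem.Str.strip l).toList ≠ [] := fun hnil => by
          rw [hnil] at hpre; simpa using hpre.length_le
        simp only [pvNixLineIsComment, hc, Bool.and_true, bne_iff_ne, ne_eq]
        simp [PySem.Str.len_eq]
        exact fun he => hne (by simp [he])
      have hstepA : pvHeaderA (l :: t) i = pvHeaderA t (i + 1) := by
        simp only [pvHeaderA, if_pos hcA]
      have hstepB : pvHeaderB (l :: t) i = pvHeaderB t (i + 1) := by
        simp only [pvHeaderB, hc, Bool.not_true, Bool.false_and, Bool.false_eq_true,
          if_false]
      rcases ih (i + 1) with ⟨hA, hB⟩ | ⟨k, l', hk, hget, hA, hB⟩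
      · left; exact ⟨hstepA.trans hA, hstepB.trans hB⟩
      · right
        refine ⟨k + 1, l', by simpa using hk, by simpa using hget, ?_, ?_⟩
        · rw [hstepA, hA, List.drop_succ_cons]
          rw [show i + 1 + (k : Int) = i + ((k : Nat) + 1 : Nat) from by push_cast; omega]
        · rw [hstepB, hB]
          rw [show i + 1 + (k : Int) = i + ((k : Nat) + 1 : Nat) from by push_cast; omega]
    · -- not a comment: both test the same match condition
      have hc' : PySem.Str.startswith (PySem.Str.strip l) "#" = false := by
        simpa using hc
      have hcA : pvNixLineIsComment (PySem.Str.strip l) = false := by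
        simp only [pvNixLineIsComment, hc', Bool.and_false]
      by_cases hm : (PySem.Str.isIn "with pkgs" l && PySem.Str.isIn "[" l) = true
      · right
        refine ⟨0, l, by simp, by simp, ?_, ?_⟩
        · simp only [pvHeaderA, hcA, Bool.false_eq_true, if_false, if_pos hm,
            Nat.cast_zero, add_zero, List.drop_succ_cons, List.drop_zero]
        · simp only [pvHeaderB, hc', Bool.not_false, Bool.true_and, if_pos hm,
            Nat.cast_zero, add_zero]
      · have hm' : (PySem.Str.isIn "with pkgs" l && PySem.Str.isIn "[" l) = false := by
          simpa using hm
        have hstepA : pvHeaderA (l :: t) i = pvHeaderA t (i + 1) := by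
          simp only [pvHeaderA, hcA, Bool.false_eq_true, if_false, hm',
            if_false]
        have hstepB : pvHeaderB (l :: t) i = pvHeaderB t (i + 1) := by
          simp only [pvHeaderB, hc', Bool.not_false, Bool.true_and, hm',
            Bool.false_eq_true, if_false]
        rcases ih (i + 1) with ⟨hA, hB⟩ | ⟨k, l', hk, hget, hA, hB⟩
        · left; exact ⟨hstepA.trans hA, hstepB.trans hB⟩
        · right
          refine ⟨k + 1, l', by simpa using hk, by simpa using hget, ?_, ?_⟩
          · rw [hstepA, hA, List.drop_succ_cons]
            rw [show i + 1 + (k : Int) = i + ((k : Nat) + 1 : Nat) from by push_cast; omega]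
          · rw [hstepB, hB]
            rw [show i + 1 + (k : Int) = i + ((k : Nat) + 1 : Nat) from by push_cast; omega]

theorem pvSumBr_take_succ (ls : List String) (k : Nat) (l : String) (h : ls[k]? = some l) :
    pvSumBr (ls.take (k + 1)) = pvSumBr (ls.take k) + pvBr l := by
  rw [List.take_add_one, h]
  simp [pvSumBr]

-- ===== VERDICT (by name: the statement is the Claim_ definition above) =====
theorem find_with_pkgs_list_insert_line_py_spec : Claim_equal_find_with_pkgs_list_insert_line_py := by
  intro lines _
  unfold Spec_find_with_pkgs_list_insert_line_py find_with_pkgs_list_insert_line_py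
    find_with_pkgs_list_insert_line_py_alt
  rcases pvHeader_rel lines 0 with ⟨hA, hB⟩ | ⟨k, l, hk, hget, hA, hB⟩
  · rw [hA, hB]
  · rw [hA, hB]
    simp only [zero_add]
    -- split the table at the header
    have hsplit : lines = lines.take (k + 1) ++ lines.drop (k + 1) := by
      simp
    have hlen : (lines.take (k + 1)).length = k + 1 := by
      simp; omega
    have hpre : pvPreB lines
        = (0 :: pvPartials 0 (lines.take (k + 1)))
          ++ pvPartials (pvSumBr (lines.take (k + 1))) (lines.drop (k + 1)) := by
      rw [pvPreB_eq]
      conv_lhs => rw [hsplit]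
      rw [pvPartials_append]
      simp
    -- base = pre[k] = balance before line k
    have hbase : (PySem.List.pyGet? (pvPreB lines) (k : Int)).getD 0
        = pvSumBr (lines.take k) := by
      rw [hpre, PySem.List.pyGet?_natCast]
      rw [List.getElem?_append_left (by simp [pvPartials_length]; omega)]
      cases k with
      | zero => simp [pvSumBr]
      | succ m =>
        rw [List.getElem?_cons_succ, pvPartials_getElem? _ 0 m (by omega)]
        simp only [Option.getD_some, zero_add]
        congr 1
        rw [List.take_take]
        congr 1
        omega
    rw [hbase, hpre]
    have hskip := pvScanB_skip (0 :: pvPartials 0 (lines.take (k + 1)))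
      (pvPartials (pvSumBr (lines.take (k + 1))) (lines.drop (k + 1)))
      0 (k : Int) (pvSumBr (lines.take k))
      (by simp only [List.length_cons, pvPartials_length, hlen]; push_cast; omega)
    rw [hskip]
    have hjeq : (0 : Int) + (0 :: pvPartials 0 (lines.take (k + 1))).length
        = ((k : Int) + 1) + 1 := by
      simp only [List.length_cons, pvPartials_length, hlen]; push_cast; omega
    rw [hjeq]
    rw [pvScanB_main _ ((k : Int) + 1) _ _ (k : Int) (by omega)]
    congr 1
    rw [pvSumBr_take_succ lines k l hget]
    omega
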